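-- pv_equiv track=rewrite | github.com/ejmockler/AgGRU-Check | deployment/backend/data.py | is_fastq
-- ===== SOURCE A (Python) =====
-- def is_fastq(seq: str) -> bool:
--     lines = seq.strip().split("\n")
--     if len(lines) % 4 != 0:
--         return False
--     for i in range(0, len(lines), 4):
--         if not lines[i].startswith("@") or not lines[i + 2].startswith("+"):
--             return False
--         if len(lines[i + 1].split("\n")) != len(lines[i + 3].split("\n")):
--             return False
--     return True
-- ===== SOURCE B (Python) =====
-- def is_fastq(seq: str) -> bool:
--     # Single character-level streaming scan: no line list is built.
--     s = seq.strip()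
--     if (s.count("\n") + 1) % 4 != 0:
--         return False
--     idx = 0  # current line number
--     at_start = True  # next character is the first of a line
--     for ch in s:
--         if at_start:
--             if idx % 4 == 0 and ch != "@":
--                 return False
--             if idx % 4 == 2 and ch != "+":
--                 return False
--             at_start = False
--         if ch == "\n":
--             idx += 1
--             at_start = True
--     return True
-- ===== Notes on version B (the rewrite author's own statement) =====
-- stated objective: alternative
-- what changed: B never builds the line list: it counts newlines for the length-mod-4 guard and then does a single character-level streaming scan over the stripped string, tracking the current line number and a line-start flag and checking '@'/'+' at line starts, instead of A's split into lines followed by an index loop over groups of four.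
import Mathlib
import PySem

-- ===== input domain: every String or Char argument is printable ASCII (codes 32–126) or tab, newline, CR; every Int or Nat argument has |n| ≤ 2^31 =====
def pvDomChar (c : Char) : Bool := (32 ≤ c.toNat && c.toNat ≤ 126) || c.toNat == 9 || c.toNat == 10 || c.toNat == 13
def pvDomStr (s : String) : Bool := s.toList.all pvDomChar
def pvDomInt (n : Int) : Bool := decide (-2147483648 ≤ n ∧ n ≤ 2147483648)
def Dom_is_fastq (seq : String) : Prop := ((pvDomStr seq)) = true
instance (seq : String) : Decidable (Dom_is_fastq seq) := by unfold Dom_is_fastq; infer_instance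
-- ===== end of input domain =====

-- B never builds the line list: it counts newlines for the mod-4 guard and then does one
-- character-level streaming scan with a line counter and a line-start flag; objective: alternative.

-- ===== PORT A =====
-- A's 'for i in range(0, len(lines), 4)' with its early returns, as a counter recursion.
-- pyGetD with default "" is exact here: at every call site i < len and len % 4 = 0,
-- so the indices i, i+1, i+2, i+3 Python reads are always in range (no IndexError).
def isFastqLoop (lines : List String) (i : Nat) : Bool :=
  if i < lines.length then
    if ¬ (PySem.Str.startswith (PySem.List.pyGetD lines (i : Int) "") "@")
       ∨ ¬ (PySem.Str.startswith (PySem.List.pyGetD lines ((i : Int) + 2) "") "+") then false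
    else if ((PySem.Str.split? (PySem.List.pyGetD lines ((i : Int) + 1) "") "\n").getD []).length
          ≠ ((PySem.Str.split? (PySem.List.pyGetD lines ((i : Int) + 3) "") "\n").getD []).length then false
    else isFastqLoop lines (i + 4)
  else true
termination_by lines.length - i
decreasing_by omega

def is_fastq (seq : String) : Bool :=
  let lines := (PySem.Str.split? (PySem.Str.strip seq) "\n").getD []
  if lines.length % 4 ≠ 0 then false
  else isFastqLoop lines 0

-- ===== PORT B =====
-- B's 'for ch in s' loop with its early returns, as structural recursion over the characters;
-- idx is the current line number, atStart says the next character begins a line.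
def fastqScan : List Char → Nat → Bool → Bool
  | [], _, _ => true
  | ch :: rest, idx, atStart =>
    if atStart ∧ idx % 4 = 0 ∧ ch ≠ '@' then false
    else if atStart ∧ idx % 4 = 2 ∧ ch ≠ '+' then false
    else if ch = '\n' then fastqScan rest (idx + 1) true
    else fastqScan rest idx false

def is_fastq_alt (seq : String) : Bool :=
  let s := PySem.Str.strip seq
  if (PySem.Str.count s "\n" + 1) % 4 ≠ 0 then false
  else fastqScan s.toList 0 true

-- ===== PRECONDITION & SPEC =====
def Spec_is_fastq (seq : String) (out : Bool) : Prop := out = is_fastq_alt seq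
instance (seq : String) (out : Bool) : Decidable (Spec_is_fastq seq out) := by unfold Spec_is_fastq; infer_instance

-- ===== CLAIM (what is proved, stated in full; the proofs are below) =====
def Claim_equal_is_fastq : Prop := ∀ (seq : String), Dom_is_fastq seq → Spec_is_fastq seq (is_fastq seq)

-- ===== LEMMAS AND PROOFS =====

-- splitting a char list at newlines, structurally
def splitNL : List Char → List (List Char)
  | [] => [[]]
  | c :: rest =>
    if c = '\n' then [] :: splitNL rest
    else match splitNL rest with
      | [] => [[c]]
      | p :: ps => (c :: p) :: ps

theorem splitNL_ne_nil (l : List Char) : splitNL l ≠ [] := by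
  cases l with
  | nil => simp [splitNL]
  | cons c rest =>
    simp only [splitNL]
    split_ifs
    · simp
    · cases splitNL rest <;> simp

-- PySem's fuelled splitOn.go is splitNL
theorem go_eq_splitNL :
    ∀ (fuel : Nat) (l cur : List Char) (acc : List (List Char)), l.length < fuel →
      ∀ p ps, splitNL l = p :: ps →
        PySem.Chars.splitOn.go ['\n'] fuel l cur acc
          = acc.reverse ++ (cur.reverse ++ p) :: ps := by
  intro fuel
  induction fuel with
  | zero => intro l cur acc h; omega
  | succ n ih =>
    intro l cur acc hlen p ps hsp
    cases l with
    | nil =>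
      simp [splitNL] at hsp
      simp [PySem.Chars.splitOn.go, hsp.1.symm, hsp.2.symm]
    | cons c rest =>
      by_cases hc : c = '\n'
      · subst hc
        have hpre : List.isPrefixOf ['\n'] ('\n' :: rest) = true := by
          simp [List.isPrefixOf]
        simp only [PySem.Chars.splitOn.go, hpre, if_true]
        simp only [splitNL, if_pos rfl] at hsp
        obtain ⟨q, qs, hq⟩ : ∃ q qs, splitNL rest = q :: qs := by
          cases h : splitNL rest with
          | nil => exact absurd h (splitNL_ne_nil rest)
          | cons q qs => exact ⟨q, qs, rfl⟩
        rw [hq] at hsp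
        injection hsp with h1 h2
        subst h1; subst h2
        rw [show List.drop (['\n'] : List Char).length ('\n' :: rest) = rest from by simp]
        rw [ih rest [] (cur.reverse :: acc) (by simp at hlen ⊢; omega) q qs hq]
        simp
      · have hpre : List.isPrefixOf ['\n'] (c :: rest) = false := by
          simp [List.isPrefixOf]
          intro h; exact absurd h.symm hc
        simp only [PySem.Chars.splitOn.go, hpre, Bool.false_eq_true, if_false]
        simp only [splitNL, if_neg hc] at hsp
        obtain ⟨q, qs, hq⟩ : ∃ q qs, splitNL rest = q :: qs := by
          cases h : splitNL rest with
          | nil => exact absurd h (splitNL_ne_nil rest)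
          | cons q qs => exact ⟨q, qs, rfl⟩
        rw [hq] at hsp
        injection hsp with h1 h2
        subst h1; subst h2
        rw [ih rest (c :: cur) acc (by simp at hlen ⊢; omega) q qs hq]
        simp

theorem splitOn_eq_splitNL (l : List Char) :
    PySem.Chars.splitOn l ['\n'] = splitNL l := by
  obtain ⟨p, ps, hp⟩ : ∃ p ps, splitNL l = p :: ps := by
    cases h : splitNL l with
    | nil => exact absurd h (splitNL_ne_nil l)
    | cons p ps => exact ⟨p, ps, rfl⟩
  rw [show PySem.Chars.splitOn l ['\n']
      = PySem.Chars.splitOn.go ['\n'] (l.length + 1) l [] [] from rfl]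
  rw [go_eq_splitNL (l.length + 1) l [] [] (by omega) p ps hp, hp]
  simp

-- A's lines list, in splitNL form
theorem lines_eq (s : String) :
    (PySem.Str.split? s "\n").getD [] = (splitNL s.toList).map String.ofList := by
  have h1 : ("\n" : String).toList = ['\n'] := rfl
  simp only [PySem.Str.split?, PySem.Chars.split?, h1, List.isEmpty_cons,
    Bool.false_eq_true, if_false, Option.map_some, Option.getD_some]
  rw [splitOn_eq_splitNL]

-- the pieces are newline-free
theorem splitNL_no_newline (l : List Char) :
    ∀ p ∈ splitNL l, ('\n' : Char) ∉ p := by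
  induction l with
  | nil => simp [splitNL]
  | cons c rest ih =>
    intro p hp
    simp only [splitNL] at hp
    by_cases hc : c = '\n'
    · rw [if_pos hc] at hp
      rcases List.mem_cons.mp hp with h | h
      · subst h; simp
      · exact ih p h
    · rw [if_neg hc] at hp
      cases hq : splitNL rest with
      | nil => exact absurd hq (splitNL_ne_nil rest)
      | cons q qs =>
        rw [hq] at hp
        rcases List.mem_cons.mp hp with h | h
        · subst h
          have hq' : '\n' ∉ q := ih q (by rw [hq]; simp)
          simp only [List.mem_cons, not_or]
          exact ⟨fun h => hc h.symm, hq'⟩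
        · exact ih p (by rw [hq]; simp [h])

-- the number of pieces is the newline count plus one
theorem splitNL_length (l : List Char) :
    (splitNL l).length = l.count '\n' + 1 := by
  induction l with
  | nil => simp [splitNL]
  | cons c rest ih =>
    simp only [splitNL]
    by_cases hc : c = '\n'
    · subst hc
      rw [if_pos rfl]
      simp only [List.length_cons, ih, List.count_cons_self]
    · rw [if_neg hc]
      cases hq : splitNL rest with
      | nil => exact absurd hq (splitNL_ne_nil rest)
      | cons q qs =>
        rw [hq] at ih
        have hc' : ¬ (('\n' : Char) = c) := fun h => hc h.symm
        simp only [List.length_cons] at ih ⊢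
        simp [List.count_cons, hc', hc]
        omega

-- PySem's fuelled substring counter, on the single character '\n'
theorem countgo_eq :
    ∀ (fuel : Nat) (l : List Char) (acc : Nat), l.length ≤ fuel →
      PySem.Chars.count.go ['\n'] fuel l acc = acc + l.count '\n' := by
  intro fuel
  induction fuel with
  | zero =>
    intro l acc h
    have : l = [] := List.eq_nil_of_length_eq_zero (by omega)
    subst this; simp [PySem.Chars.count.go]
  | succ n ih =>
    intro l acc hlen
    cases l with
    | nil => simp [PySem.Chars.count.go]
    | cons c rest =>
      by_cases hc : c = '\n'
      · subst hc
        have hpre : List.isPrefixOf ['\n'] ('\n' :: rest) = true := by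
          simp [List.isPrefixOf]
        simp only [PySem.Chars.count.go, hpre, if_true]
        rw [show List.drop (['\n'] : List Char).length ('\n' :: rest) = rest from by simp]
        rw [ih rest (acc + 1) (by simp at hlen ⊢; omega)]
        simp [List.count_cons]; omega
      · have hpre : List.isPrefixOf ['\n'] (c :: rest) = false := by
          simp [List.isPrefixOf]
          intro h; exact absurd h.symm hc
        simp only [PySem.Chars.count.go, hpre, Bool.false_eq_true, if_false]
        rw [ih rest acc (by simp at hlen ⊢; omega)]
        simp [List.count_cons, show (c == '\n') = false from by simp [hc]]

theorem count_nl_eq (s : String) :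
    PySem.Str.count s "\n" = s.toList.count '\n' := by
  have h1 : ("\n" : String).toList = ['\n'] := rfl
  simp only [PySem.Str.count, h1, PySem.Chars.count, List.isEmpty_cons,
    Bool.false_eq_true, if_false]
  simpa using countgo_eq s.toList.length s.toList 0 (le_refl _)

-- gluing the pieces back with newlines
def glueNL : List (List Char) → List Char
  | [] => []
  | p :: [] => p
  | p :: q :: ps => p ++ '\n' :: glueNL (q :: ps)

theorem glue_splitNL (l : List Char) : glueNL (splitNL l) = l := by
  induction l with
  | nil => simp [splitNL, glueNL]
  | cons c rest ih =>
    simp only [splitNL]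
    by_cases hc : c = '\n'
    · subst hc
      rw [if_pos rfl]
      cases hq : splitNL rest with
      | nil => exact absurd hq (splitNL_ne_nil rest)
      | cons q qs =>
        rw [hq] at ih
        simp [glueNL, ih]
    · rw [if_neg hc]
      cases hq : splitNL rest with
      | nil => exact absurd hq (splitNL_ne_nil rest)
      | cons q qs =>
        rw [hq] at ih
        cases qs with
        | nil => simpa [glueNL] using ih
        | cons r rs => simpa [glueNL] using ih

-- the per-line-start check B performs
def chkNL (idx : Nat) (ch : Char) : Bool :=
  if idx % 4 = 0 ∧ ch ≠ '@' then false
  else if idx % 4 = 2 ∧ ch ≠ '+' then false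
  else true

-- the first character the scan meets at the start of piece p (none at end of input)
def headChar : List Char → List (List Char) → Option Char
  | [], [] => none
  | [], _ :: _ => some '\n'
  | c :: _, _ => some c

def chkOpt (idx : Nat) : Option Char → Bool
  | none => true
  | some ch => chkNL idx ch

-- B's scan at the piece level
def pieceLoop : List (List Char) → Nat → Bool
  | [], _ => true
  | p :: ps, idx => chkOpt idx (headChar p ps) && pieceLoop ps (idx + 1)

-- inside a line the scan just walks to the next newline
theorem scan_skip (q : List Char) (rest : List Char) (idx : Nat) (hq : ('\n' : Char) ∉ q) :
    fastqScan (q ++ rest) idx false = fastqScan rest idx false := by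
  induction q with
  | nil => rfl
  | cons c q' ih =>
    have hc : ¬ (c = '\n') := by simp at hq; tauto
    simp only [List.cons_append, fastqScan]
    simp only [false_and, if_false, if_neg hc]
    exact ih (by simp at hq; tauto)

-- B's character scan equals the piece-level loop
theorem scan_glue :
    ∀ (ps : List (List Char)) (idx : Nat), (∀ p ∈ ps, ('\n' : Char) ∉ p) →
      fastqScan (glueNL ps) idx true = pieceLoop ps idx := by
  intro ps
  induction ps with
  | nil => intro idx _; rfl
  | cons p ps' ih =>
    intro idx hnl
    have hp : ('\n' : Char) ∉ p := hnl p (by simp)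
    cases ps' with
    | nil =>
      cases p with
      | nil => rfl
      | cons c p' =>
        have hc : ¬ (c = '\n') := by simp at hp; tauto
        simp only [glueNL, fastqScan, pieceLoop, headChar, chkOpt, chkNL]
        rw [if_neg hc]
        rw [show p' = p' ++ ([] : List Char) from by simp,
          scan_skip p' [] idx (by simp at hp; tauto)]
        simp only [fastqScan]
        by_cases h0 : idx % 4 = 0 ∧ c ≠ '@' <;> by_cases h2 : idx % 4 = 2 ∧ c ≠ '+' <;>
          simp [h0, h2, pieceLoop]
    | cons q qs =>
      have hrec : fastqScan (glueNL (q :: qs)) (idx + 1) true = pieceLoop (q :: qs) (idx + 1) :=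
        ih (idx + 1) (fun r hr => hnl r (by simp [hr]))
      cases p with
      | nil =>
        have e1 : glueNL ([] :: q :: qs) = '\n' :: glueNL (q :: qs) := rfl
        have e2 : pieceLoop ([] :: q :: qs) idx
            = (chkNL idx '\n' && pieceLoop (q :: qs) (idx + 1)) := rfl
        rw [e1, e2]
        simp only [fastqScan]
        by_cases h0 : idx % 4 = 0
        · simp [h0, chkNL]
        · by_cases h2 : idx % 4 = 2
          · simp [h0, h2, chkNL]
          · simp [h0, h2, chkNL, hrec]
      | cons c p' =>
        have hc : ¬ (c = '\n') := by simp at hp; tauto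
        have e1 : glueNL ((c :: p') :: q :: qs)
            = c :: (p' ++ '\n' :: glueNL (q :: qs)) := rfl
        have e2 : pieceLoop ((c :: p') :: q :: qs) idx
            = (chkNL idx c && pieceLoop (q :: qs) (idx + 1)) := rfl
        rw [e1, e2]
        simp only [fastqScan]
        by_cases h0 : idx % 4 = 0 ∧ c ≠ '@'
        · simp [h0, chkNL]
        · by_cases h2 : idx % 4 = 2 ∧ c ≠ '+'
          · simp [h0, h2, chkNL]
          · rw [if_neg (by simpa using h0), if_neg (by simpa using h2), if_neg hc,
              scan_skip p' _ idx (by simp at hp; tauto)]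
            simp only [fastqScan]
            rw [if_pos trivial, hrec]
            have : chkNL idx c = true := by
              simp [chkNL]
              constructor
              · by_contra hcon
                push_neg at hcon
                exact h0 ⟨hcon.1, hcon.2⟩
              · by_contra hcon
                push_neg at hcon
                exact h2 ⟨hcon.1, hcon.2⟩
            rw [this]
            simp

-- the common normal form: the per-record check, consuming four lines at a time
def chunkOK : List String → Bool
  | a :: _ :: c :: _ :: rest =>
      (PySem.Str.startswith a "@" && PySem.Str.startswith c "+") && chunkOK rest
  | _ => true

-- B's piece loop equals chunkOK when the number of pieces is divisible by 4
theorem pieceLoop_eq_chunkOK :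
    ∀ (n : Nat) (ps : List (List Char)), ps.length = n → ∀ (idx : Nat), idx % 4 = 0 →
      ps.length % 4 = 0 → pieceLoop ps idx = chunkOK (ps.map String.ofList) := by
  intro n
  induction n using Nat.strong_induction_on with
  | _ n ih =>
  intro ps hn idx hidx h4
  match ps with
  | [] => rfl
  | [a] => simp at h4
  | [a, b] => simp at h4
  | [a, b, c] => simp at h4
  | a :: b :: c :: d :: rest =>
    have hrec : pieceLoop rest (idx + 4) = chunkOK (rest.map String.ofList) := by
      refine ih rest.length (by simp at hn; omega) rest rfl (idx + 4) (by omega)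
        (by simp at h4; omega)
    have hb : (idx + 1) % 4 = 1 := by omega
    have hcc : (idx + 2) % 4 = 2 := by omega
    have hd : (idx + 3) % 4 = 3 := by omega
    have hcheckA : chkOpt idx (headChar a (b :: c :: d :: rest))
        = PySem.Str.startswith (String.ofList a) "@" := by
      cases a with
      | nil =>
        simp [headChar, chkOpt, chkNL, hidx, PySem.Str.startswith, PySem.Chars.startswith,
          List.isPrefixOf]
      | cons ch a' =>
        simp only [headChar, chkOpt, PySem.Str.startswith, PySem.Chars.startswith,
          String.toList_ofList, show ("@" : String).toList = ['@'] from rfl]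
        by_cases h : ch = '@'
        · subst h; simp [chkNL, hidx, List.isPrefixOf]
        · simp [chkNL, hidx, h, List.isPrefixOf]
          intro hh; exact absurd hh.symm h
    have hcheckC : chkOpt (idx + 2) (headChar c (d :: rest))
        = PySem.Str.startswith (String.ofList c) "+" := by
      cases c with
      | nil =>
        simp [headChar, chkOpt, chkNL, hcc, PySem.Str.startswith, PySem.Chars.startswith,
          List.isPrefixOf]
      | cons ch c' =>
        simp only [headChar, chkOpt, PySem.Str.startswith, PySem.Chars.startswith,
          String.toList_ofList, show ("+" : String).toList = ['+'] from rfl]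
        by_cases h : ch = '+'
        · subst h; simp [chkNL, hcc, List.isPrefixOf]
        · simp [chkNL, hcc, h, List.isPrefixOf]
          intro hh; exact absurd hh.symm h
    have hcheckB : chkOpt (idx + 1) (headChar b (c :: d :: rest)) = true := by
      cases b with
      | nil => simp [headChar, chkOpt, chkNL, hb]
      | cons ch b' => simp [headChar, chkOpt, chkNL, hb]
    have hcheckD : chkOpt (idx + 3) (headChar d rest) = true := by
      cases d with
      | nil => cases rest <;> simp [headChar, chkOpt, chkNL, hd]
      | cons ch d' => simp [headChar, chkOpt, chkNL, hd]
    simp only [pieceLoop]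
    rw [hcheckA, hcheckB, hcheckC, hcheckD]
    simp only [List.map_cons, chunkOK]
    rw [show idx + 1 + 1 + 1 + 1 = idx + 4 from by omega, hrec]
    cases PySem.Str.startswith (String.ofList a) "@" <;>
      cases PySem.Str.startswith (String.ofList c) "+" <;>
        cases chunkOK (rest.map String.ofList) <;> rfl

-- a newline-free char list is a single piece
theorem splitNL_free : ∀ (l : List Char), ('\n' : Char) ∉ l → splitNL l = [l] := by
  intro l
  induction l with
  | nil => intro _; rfl
  | cons c rest ih =>
    intro hx
    have hc : ¬ (c = '\n') := by simp at hx; tauto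
    simp only [splitNL, if_neg hc, ih (by simp at hx; tauto)]

-- a newline-free string splits on "\n" into exactly itself
theorem split_singleton (x : String) (hx : ('\n' : Char) ∉ x.toList) :
    (PySem.Str.split? x "\n").getD [] = [x] := by
  rw [lines_eq, splitNL_free x.toList hx]
  simp

-- A-side: the counter loop equals chunkOK of the lines not yet consumed
theorem loop_eq_chunkOK (lines : List String)
    (hnl : ∀ l ∈ lines, ('\n' : Char) ∉ l.toList) (hlen4 : lines.length % 4 = 0) :
    ∀ (d i : Nat), lines.length - i = d → i % 4 = 0 →
      isFastqLoop lines i = chunkOK (lines.drop i) := by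
  intro d
  induction d using Nat.strong_induction_on with
  | _ d ih =>
  intro i hd hi4
  by_cases hlt : i < lines.length
  · have hi3 : i + 3 < lines.length := by omega
    have g0 : PySem.List.pyGetD lines (i : Int) "" = lines[i] := by
      rw [PySem.List.pyGetD_natCast]; simp [List.getD, hlt]
    have g1 : PySem.List.pyGetD lines ((i : Int) + 1) "" = lines[i+1] := by
      rw [show ((i : Int) + 1) = ((i+1 : Nat) : Int) from by push_cast; ring,
        PySem.List.pyGetD_natCast]
      simp [List.getD, show i + 1 < lines.length from by omega]
    have g2 : PySem.List.pyGetD lines ((i : Int) + 2) "" = lines[i+2] := by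
      rw [show ((i : Int) + 2) = ((i+2 : Nat) : Int) from by push_cast; ring,
        PySem.List.pyGetD_natCast]
      simp [List.getD, show i + 2 < lines.length from by omega]
    have g3 : PySem.List.pyGetD lines ((i : Int) + 3) "" = lines[i+3] := by
      rw [show ((i : Int) + 3) = ((i+3 : Nat) : Int) from by push_cast; ring,
        PySem.List.pyGetD_natCast]
      simp [List.getD, hi3]
    have hsplit1 : (PySem.Str.split? lines[i+1] "\n").getD [] = [lines[i+1]] :=
      split_singleton _ (hnl _ (List.getElem_mem _))
    have hsplit3 : (PySem.Str.split? lines[i+3] "\n").getD [] = [lines[i+3]] :=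
      split_singleton _ (hnl _ (List.getElem_mem _))
    have hdrop : lines.drop i =
        lines[i] :: lines[i+1] :: lines[i+2] :: lines[i+3] :: lines.drop (i+4) := by
      rw [List.drop_eq_getElem_cons hlt,
          List.drop_eq_getElem_cons (show i+1 < lines.length from by omega),
          List.drop_eq_getElem_cons (show i+2 < lines.length from by omega),
          List.drop_eq_getElem_cons hi3]
    rw [isFastqLoop]
    simp only [hlt, if_true, g0, g1, g2, g3, hsplit1, hsplit3]
    rw [hdrop, chunkOK.eq_def]
    simp only [List.length_cons, List.length_nil, ne_eq, not_true_eq_false, if_false]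
    rw [ih (lines.length - (i+4)) (by omega) (i+4) rfl (by omega)]
    cases hat : PySem.Str.startswith lines[i] "@" <;>
      cases hplus : PySem.Str.startswith lines[i+2] "+" <;>
        simp [hat, hplus]
  · rw [isFastqLoop]
    simp only [hlt, if_false]
    rw [List.drop_of_length_le (by omega), chunkOK.eq_def]

-- ===== VERDICT (by name: the statement is the Claim_ definition above) =====
theorem is_fastq_spec : Claim_equal_is_fastq := by
  intro seq _
  unfold Spec_is_fastq is_fastq is_fastq_alt
  simp only [lines_eq, List.length_map, splitNL_length, count_nl_eq]
  by_cases h4 : ((PySem.Str.strip seq).toList.count '\n' + 1) % 4 = 0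
  · simp only [h4, ne_eq, not_true_eq_false, if_false]
    have hnl : ∀ l ∈ (splitNL (PySem.Str.strip seq).toList).map String.ofList,
        ('\n' : Char) ∉ l.toList := by
      intro l hl
      simp only [List.mem_map] at hl
      obtain ⟨p, hp, rfl⟩ := hl
      simpa using splitNL_no_newline (PySem.Str.strip seq).toList p hp
    have hlen4 : ((splitNL (PySem.Str.strip seq).toList).map String.ofList).length % 4 = 0 := by
      rw [List.length_map, splitNL_length]; exact h4
    rw [loop_eq_chunkOK _ hnl hlen4
      ((splitNL (PySem.Str.strip seq).toList).map String.ofList).length 0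
      (Nat.sub_zero _) (Nat.zero_mod 4), List.drop_zero]
    conv_rhs => rw [← glue_splitNL (PySem.Str.strip seq).toList]
    rw [scan_glue _ 0 (splitNL_no_newline (PySem.Str.strip seq).toList)]
    exact (pieceLoop_eq_chunkOK (splitNL (PySem.Str.strip seq).toList).length
      (splitNL (PySem.Str.strip seq).toList) rfl 0 (Nat.zero_mod 4)
      (by rw [splitNL_length]; exact h4)).symm
  · simp only [h4, ne_eq, not_false_iff, if_true]
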